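-- pv_equiv track=rewrite | github.com/bhanotr/python-dsa-cli | solutions/url_encoder.py | is_valid_encoded
-- ===== SOURCE A (Python) =====
-- def is_valid_encoded(encoded_url: str) -> bool:
--     """
--     Validate that a URL is properly encoded.
--
--     Args:
--         encoded_url: The encoded URL to validate
--
--     Returns:
--         True if properly encoded, False otherwise
--     """
--     i = 0
--     while i < len(encoded_url):
--         if encoded_url[i] == '%':
--             if i + 2 >= len(encoded_url):
--                 return False
--             hex_str = encoded_url[i+1:i+3]
--             if not all(c in '0123456789abcdefABCDEF' for c in hex_str):
--                 return False
--             i += 3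
--         else:
--             i += 1
--     return True
-- ===== SOURCE B (Python) =====
-- def is_valid_encoded(encoded_url: str) -> bool:
--     hexdigits = '0123456789abcdefABCDEF'
--     parts = encoded_url.split('%')
--     return all(len(p) >= 2 and p[0] in hexdigits and p[1] in hexdigits
--                for p in parts[1:])
-- ===== Notes on version B (the rewrite author's own statement) =====
-- stated objective: idiomatic
-- what changed: Replaces A's stateful index-skipping while loop (jump by 3 after each valid %XX) by a single split('%') and a uniform all() check that every segment after a '%' starts with two hex digits.
import Mathlib
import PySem

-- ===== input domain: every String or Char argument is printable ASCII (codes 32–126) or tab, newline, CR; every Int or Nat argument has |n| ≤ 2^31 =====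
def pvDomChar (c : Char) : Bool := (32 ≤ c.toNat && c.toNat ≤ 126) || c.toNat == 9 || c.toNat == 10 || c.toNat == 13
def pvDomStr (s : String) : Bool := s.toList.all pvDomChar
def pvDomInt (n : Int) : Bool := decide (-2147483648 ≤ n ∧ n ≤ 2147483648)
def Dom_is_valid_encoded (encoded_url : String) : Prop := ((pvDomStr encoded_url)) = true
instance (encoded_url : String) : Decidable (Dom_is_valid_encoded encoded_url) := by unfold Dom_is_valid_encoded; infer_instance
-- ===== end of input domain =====

-- B replaces A's index-skipping while loop by a split on '%' and a uniform check of each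
-- following segment's first two characters (objective: idiomatic; same return value everywhere).

-- ===== PORT A =====
-- 'c in "0123456789abcdefABCDEF"' for a single character
def pvHex (c : Char) : Bool := "0123456789abcdefABCDEF".toList.contains c

-- the while loop of A, state = the index i
def pvALoop (cs : List Char) (i : Nat) : Bool :=
  if _h : i < cs.length then
    if cs.getD i default = '%' then
      if cs.length ≤ i + 2 then false
      else if (PySem.List.slice cs (some ((i : Int) + 1)) (some ((i : Int) + 3))).all pvHex then
        pvALoop cs (i + 3)
      else false
    else pvALoop cs (i + 1)
  else true
termination_by cs.length - i

def is_valid_encoded (encoded_url : String) : Bool :=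
  pvALoop encoded_url.toList 0

-- ===== PORT B =====
-- 'len(p) >= 2 and p[0] in hexdigits and p[1] in hexdigits'
def pvOkPart (p : List Char) : Bool :=
  decide (2 ≤ p.length) && pvHex (p.getD 0 default) && pvHex (p.getD 1 default)

def is_valid_encoded_alt (encoded_url : String) : Bool :=
  -- parts = encoded_url.split('%'); all(ok(p) for p in parts[1:])
  ((PySem.Chars.splitOn encoded_url.toList "%".toList).drop 1).all pvOkPart

-- ===== PRECONDITION & SPEC =====
def Spec_is_valid_encoded (encoded_url : String) (out : Bool) : Prop := out = is_valid_encoded_alt encoded_url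
instance (encoded_url : String) (out : Bool) : Decidable (Spec_is_valid_encoded encoded_url out) := by unfold Spec_is_valid_encoded; infer_instance

-- ===== CLAIM (what is proved, stated in full; the proofs are below) =====
def Claim_equal_is_valid_encoded : Prop := ∀ (encoded_url : String), Dom_is_valid_encoded encoded_url → Spec_is_valid_encoded encoded_url (is_valid_encoded encoded_url)

-- ===== LEMMAS AND PROOFS =====

-- functional split on '%': (first segment, remaining segments)
def pvSplitP : List Char → List Char × List (List Char)
  | [] => ([], [])
  | c :: t =>
    let r := pvSplitP t
    if c = '%' then ([], r.1 :: r.2) else (c :: r.1, r.2)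

-- A's loop, rephrased as structural recursion over the remaining suffix
def pvScan : List Char → Bool
  | [] => true
  | c :: t =>
    if c = '%' then
      match t with
      | a :: b :: t' => if pvHex a && pvHex b then pvScan t' else false
      | _ => false
    else pvScan t

lemma pvScan_cons_ne (c : Char) (t : List Char) (hc : c ≠ '%') :
    pvScan (c :: t) = pvScan t := by
  rw [pvScan.eq_def]; simp [hc]

lemma pvHex_ne_percent {c : Char} (h : pvHex c = true) : c ≠ '%' := by
  intro rfl; simp [pvHex] at h

lemma pvALoop_eq_scan (cs : List Char) (i : Nat) :
    pvALoop cs i = pvScan (cs.drop i) := by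
  by_cases h : i < cs.length
  · have hdrop : cs.drop i = cs[i] :: cs.drop (i + 1) :=
      List.drop_eq_getElem_cons h
    rw [pvALoop]
    simp only [h, dif_pos]
    by_cases hp : cs.getD i default = '%'
    · have hget : cs[i] = '%' := by
        rwa [List.getD_eq_getElem cs default h] at hp
      rw [hdrop, hget, if_pos hp]
      by_cases hlen : cs.length ≤ i + 2
      · rw [if_pos hlen]
        cases hm : cs.drop (i + 1) with
        | nil => rfl
        | cons a t2 =>
          cases t2 with
          | nil => rfl
          | cons b t3 =>
            exfalso
            have := congrArg List.length hm
            simp [List.length_drop] at this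
            omega
      · rw [if_neg hlen]
        have h1 : i + 1 < cs.length := by omega
        have h2 : i + 2 < cs.length := by omega
        have hd1 : cs.drop (i + 1) = cs[i + 1] :: cs.drop (i + 2) :=
          List.drop_eq_getElem_cons h1
        have hd2 : cs.drop (i + 2) = cs[i + 2] :: cs.drop (i + 3) :=
          List.drop_eq_getElem_cons h2
        have hslice : PySem.List.slice cs (some ((i : Int) + 1)) (some ((i : Int) + 3))
            = [cs[i + 1], cs[i + 2]] := by
          have e1 : ((i : Int) + 1) = ((i + 1 : Nat) : Int) := by push_cast; ring
          have e3 : ((i : Int) + 3) = ((i + 3 : Nat) : Int) := by push_cast; ring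
          rw [e1, e3, PySem.List.slice_natCast]
          rw [show i + 3 - (i + 1) = 2 from by omega]
          rw [hd1, hd2]; rfl
        rw [hslice, hd1, hd2]
        have hR : pvScan ('%' :: cs[i + 1] :: cs[i + 2] :: cs.drop (i + 3))
            = if pvHex cs[i + 1] && pvHex cs[i + 2] then pvScan (cs.drop (i + 3)) else false := rfl
        rw [hR]
        have hall : ([cs[i + 1], cs[i + 2]]).all pvHex = (pvHex cs[i + 1] && pvHex cs[i + 2]) := by
          simp
        rw [hall]
        by_cases hab : (pvHex cs[i + 1] && pvHex cs[i + 2]) = true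
        · rw [if_pos hab, if_pos hab]
          exact pvALoop_eq_scan cs (i + 3)
        · rw [if_neg hab, if_neg hab]
    · rw [if_neg hp]
      have hget : cs[i] ≠ '%' := by
        rwa [List.getD_eq_getElem cs default h] at hp
      rw [hdrop, pvScan_cons_ne _ _ hget]
      exact pvALoop_eq_scan cs (i + 1)
  · rw [pvALoop]
    simp only [h, dif_neg, not_false_iff]
    rw [List.drop_eq_nil_of_le (by omega)]
    rfl
termination_by cs.length - i
decreasing_by all_goals omega

lemma pvScan_eq_splitP (l : List Char) :
    pvScan l = (pvSplitP l).2.all pvOkPart := by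
  match l with
  | [] => rfl
  | c :: t =>
    by_cases hc : c = '%'
    · subst hc
      match t with
      | [] => simp [pvScan, pvSplitP, pvOkPart]
      | '%' :: t'' =>
        have h1 : pvScan ('%' :: '%' :: t'') = false := by
          cases t'' with
          | nil => rfl
          | cons b t3 =>
            have : pvHex '%' = false := by decide
            simp [pvScan, this]
        rw [h1]
        simp [pvSplitP, pvOkPart]
      | [a] =>
        have ha : pvScan ['%', a] = false := rfl
        rw [ha]
        by_cases hap : a = '%'
        · subst hap; simp [pvSplitP, pvOkPart]
        · simp [pvSplitP, hap, pvOkPart]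
      | a :: b :: t' =>
        by_cases hap : a = '%'
        · subst hap
          have h1 : pvScan ('%' :: '%' :: b :: t') = false := by
            have : pvHex '%' = false := by decide
            simp [pvScan, this]
          rw [h1]; simp [pvSplitP, pvOkPart]
        · have hstep : pvScan ('%' :: a :: b :: t')
              = if pvHex a && pvHex b then pvScan t' else false := rfl
          rw [hstep]
          by_cases hab : (pvHex a && pvHex b) = true
          · rw [Bool.and_eq_true] at hab
            have hb := pvHex_ne_percent hab.2
            have ih := pvScan_eq_splitP t'
            rw [if_pos (by simp [hab.1, hab.2])]
            have hok : pvOkPart (a :: b :: (pvSplitP t').1) = true := by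
              simp [pvOkPart, hab.1, hab.2]
            simp [pvSplitP, if_neg hap, if_neg hb, ih, hok]
          · rw [if_neg hab]
            by_cases hha : pvHex a = true
            · have hb : pvHex b = false := by
                cases hpb : pvHex b <;> simp_all
              by_cases hbp : b = '%'
              · subst hbp
                simp [pvSplitP, if_neg hap, pvOkPart, pvHex]
              · simp [pvSplitP, if_neg hap, if_neg hbp, pvOkPart, hb]
            · simp only [Bool.not_eq_true] at hha
              by_cases hbp : b = '%' <;>
                simp [pvSplitP, if_neg hap, hbp, pvOkPart, hha]
    · have ih := pvScan_eq_splitP t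
      rw [pvScan_cons_ne _ _ hc]
      simp only [pvSplitP, if_neg hc, ih]

lemma pvSplitOn_go_eq (fuel : Nat) :
    ∀ (l cur : List Char) (acc : List (List Char)), l.length ≤ fuel →
      PySem.Chars.splitOn.go ['%'] fuel l cur acc
        = acc.reverse ++ (cur.reverse ++ (pvSplitP l).1) :: (pvSplitP l).2 := by
  induction fuel with
  | zero =>
    intro l cur acc hl
    have : l = [] := List.eq_nil_of_length_eq_zero (by omega)
    subst this
    simp [PySem.Chars.splitOn.go, pvSplitP]
  | succ fuel ih =>
    intro l cur acc hl
    match l with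
    | [] => simp [PySem.Chars.splitOn.go, pvSplitP]
    | c :: rest =>
      rw [PySem.Chars.splitOn.go]
      by_cases hc : c = '%'
      · subst hc
        have hpre : List.isPrefixOf ['%'] ('%' :: rest) = true := by
          simp [List.isPrefixOf]
        simp only [hpre]
        have hdrop : List.drop (List.length ['%']) ('%' :: rest) = rest := by simp
        rw [hdrop, ih rest [] (List.reverse cur :: acc) (by simp at hl; omega)]
        simp [pvSplitP]
      · have hpre : List.isPrefixOf ['%'] (c :: rest) = false := by
          simp [List.isPrefixOf]
          exact fun h => hc h.symm
        simp only [hpre, Bool.false_eq_true, if_false]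
        rw [ih rest (c :: cur) acc (by simp at hl; omega)]
        simp [pvSplitP, hc]

lemma pvSplitOn_eq (l : List Char) :
    PySem.Chars.splitOn l ['%'] = (pvSplitP l).1 :: (pvSplitP l).2 := by
  unfold PySem.Chars.splitOn
  rw [pvSplitOn_go_eq (l.length + 1) l [] [] (by omega)]
  simp

-- ===== VERDICT (by name: the statement is the Claim_ definition above) =====
theorem is_valid_encoded_spec : Claim_equal_is_valid_encoded := by
  intro s _
  unfold Spec_is_valid_encoded is_valid_encoded is_valid_encoded_alt
  rw [pvALoop_eq_scan s.toList 0, List.drop_zero, pvScan_eq_splitP]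
  rw [show "%".toList = ['%'] from rfl, pvSplitOn_eq]
  simp
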